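-- pv_equiv track=rewrite | github.com/PlaySmartBuas/PlaySmart-Dashboard-Buas-Main | electron_application/backend/app/router/hive.py | _normalize_video_filename
-- ===== SOURCE A (Python) =====
-- def _normalize_video_filename(filename: str) -> str:
--     """Strip CSV/merged suffixes and ensure .mp4 extension."""
--     for old, new in [
--         ("_merged.csv", ".mp4"),
--         ("_merged.mp4", ".mp4"),
--         (".csv",        ".mp4"),
--     ]:
--         if filename.endswith(old):
--             return filename[: -len(old)] + new
--     if not filename.endswith(".mp4"):
--         return filename + ".mp4"
--     return filename
-- ===== SOURCE B (Python) =====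
-- def _normalize_video_filename(filename: str) -> str:
--     """Strip CSV/merged suffixes and ensure .mp4 extension."""
--     stem = filename
--     if stem.endswith((".csv", ".mp4")):
--         stem = stem[:-4]
--         if stem.endswith("_merged"):
--             stem = stem[:-7]
--     return stem + ".mp4"
-- ===== Notes on version B (the rewrite author's own statement) =====
-- stated objective: simpler
-- what changed: Replaces the ordered table of four endswith checks with early returns by a two-stage peel: strip a recognized 4-char extension, then a trailing merged tag, then append the mp4 extension unconditionally.
import Mathlib
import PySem

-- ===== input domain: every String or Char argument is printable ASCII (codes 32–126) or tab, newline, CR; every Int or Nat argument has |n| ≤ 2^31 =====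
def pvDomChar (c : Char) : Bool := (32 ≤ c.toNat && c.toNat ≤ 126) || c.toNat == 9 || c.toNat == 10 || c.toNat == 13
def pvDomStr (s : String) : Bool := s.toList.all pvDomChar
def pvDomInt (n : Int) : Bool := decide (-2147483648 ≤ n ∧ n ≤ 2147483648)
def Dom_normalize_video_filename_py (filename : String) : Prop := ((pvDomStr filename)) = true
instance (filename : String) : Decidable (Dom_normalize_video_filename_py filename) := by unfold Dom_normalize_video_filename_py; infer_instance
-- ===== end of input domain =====

-- B replaces the ordered table of endswith checks by a two-stage peel (strip extension, strip '_merged', append '.mp4'); same cost, objective: simpler.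

-- ===== PORT A =====
-- the literal suffix table of A's for-loop
def pvPairsA : List (List Char × List Char) :=
  [("_merged.csv".toList, ".mp4".toList),
   ("_merged.mp4".toList, ".mp4".toList),
   (".csv".toList, ".mp4".toList)]

-- A's for-loop: first (old, new) with filename.endswith(old) returns filename[:-len(old)] + new
def pvLoopA (cs : List Char) : List (List Char × List Char) → Option (List Char)
  | [] => none
  | (old, new) :: rest =>
      if PySem.Chars.endswith cs old then
        some (PySem.List.slice cs none (some (-(old.length : Int))) ++ new)
      else pvLoopA cs rest

def normalize_video_filename_py (filename : String) : String :=
  match pvLoopA filename.toList pvPairsA with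
  | some r => String.ofList r
  | none =>
      if ¬ PySem.Chars.endswith filename.toList ".mp4".toList then
        String.ofList (filename.toList ++ ".mp4".toList)
      else filename

-- ===== PORT B =====
-- stem = filename; if it ends with '.csv' or '.mp4' strip those 4 chars and then a trailing
-- '_merged' if present; return stem + '.mp4'.  (s[:-k] is PySem.List.slice … (-k))
def normalize_video_filename_py_alt (filename : String) : String :=
  let cs := filename.toList
  let stem :=
    if PySem.Chars.endswith cs ".csv".toList || PySem.Chars.endswith cs ".mp4".toList then
      let s1 := PySem.List.slice cs none (some (-4))
      if PySem.Chars.endswith s1 "_merged".toList then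
        PySem.List.slice s1 none (some (-7))
      else s1
    else cs
  String.ofList (stem ++ ".mp4".toList)

-- ===== PRECONDITION & SPEC =====
def Spec_normalize_video_filename_py (filename : String) (out : String) : Prop := out = normalize_video_filename_py_alt filename
instance (filename : String) (out : String) : Decidable (Spec_normalize_video_filename_py filename out) := by unfold Spec_normalize_video_filename_py; infer_instance

-- ===== CLAIM (what is proved, stated in full; the proofs are below) =====
def Claim_equal_normalize_video_filename_py : Prop := ∀ (filename : String), Dom_normalize_video_filename_py filename → Spec_normalize_video_filename_py filename (normalize_video_filename_py filename)

-- ===== LEMMAS AND PROOFS =====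

-- endswith through reversal: cs ends with old iff cs.reverse starts with old.reverse
theorem pv_endswith_rev (cs old : List Char) :
    PySem.Chars.endswith cs old = PySem.Chars.startswith cs.reverse old.reverse := by
  rcases h : PySem.Chars.startswith cs.reverse old.reverse with _ | _
  · rw [Bool.eq_false_iff] at h ⊢
    intro he
    exact h (by
      rw [PySem.Chars.startswith_iff]
      rw [PySem.Chars.endswith_iff] at he
      exact (List.reverse_prefix).mpr he)
  · rw [PySem.Chars.startswith_iff] at h
    rw [PySem.Chars.endswith_iff]
    exact (List.reverse_prefix).mp h

-- a prefix test of a concatenation splits into two prefix tests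
theorem pv_startswith_append (r p q : List Char) :
    PySem.Chars.startswith r (p ++ q) =
      (PySem.Chars.startswith r p && PySem.Chars.startswith (r.drop p.length) q) := by
  by_cases hp : p <+: r
  · obtain ⟨t, rfl⟩ := hp
    have h1 : PySem.Chars.startswith (p ++ t) p = true :=
      (PySem.Chars.startswith_iff _ _).mpr ⟨t, rfl⟩
    rw [h1, Bool.true_and, List.drop_left]
    rcases hq : PySem.Chars.startswith t q with _ | _
    · rw [Bool.eq_false_iff] at hq ⊢
      intro h
      exact hq ((PySem.Chars.startswith_iff _ _).mpr
        ((List.prefix_append_right_inj p).mp ((PySem.Chars.startswith_iff _ _).mp h)))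
    · exact (PySem.Chars.startswith_iff _ _).mpr
        ((List.prefix_append_right_inj p).mpr ((PySem.Chars.startswith_iff _ _).mp hq))
  · have h1 : PySem.Chars.startswith r p = false := by
      rw [Bool.eq_false_iff]
      intro h; exact hp ((PySem.Chars.startswith_iff _ _).mp h)
    rw [h1, Bool.false_and, Bool.eq_false_iff]
    intro h
    exact hp ((List.prefix_append p q).trans ((PySem.Chars.startswith_iff _ _).mp h))

-- if cs.reverse starts with old.reverse then cs[:-len(old)] = (cs.reverse.drop old.length).reverse
theorem pv_slice_of_rev_prefix (cs old : List Char) (hold : 0 < old.length)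
    (h : PySem.Chars.startswith cs.reverse old.reverse = true) :
    PySem.List.slice cs none (some (-(old.length : Int))) = (cs.reverse.drop old.length).reverse := by
  rw [PySem.Chars.startswith_iff] at h
  obtain ⟨t, ht⟩ := h
  have hcs : cs = t.reverse ++ old := by
    have := congrArg List.reverse ht
    simpa using this.symm
  subst hcs
  rw [PySem.List.slice_to_neg_natCast _ old.length hold]
  have hl : (t.reverse ++ old).length - old.length = t.reverse.length := by simp
  rw [hl, List.take_left]
  have hr : (t.reverse ++ old).reverse = old.reverse ++ t := by simp
  rw [hr]
  have hd : (old.reverse ++ t).drop old.length = t := by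
    have : old.length = old.reverse.length := by simp
    rw [this, List.drop_left]
  rw [hd]

-- A's and B's suffix tests expressed through reversed-prefix tests
theorem pv_e1 (cs : List Char) :
    PySem.Chars.endswith cs "_merged.csv".toList =
      (PySem.Chars.startswith cs.reverse "vsc.".toList &&
       PySem.Chars.startswith (cs.reverse.drop 4) "degrem_".toList) := by
  rw [pv_endswith_rev]
  have h : ("_merged.csv".toList).reverse = "vsc.".toList ++ "degrem_".toList := by decide
  have h4 : ("vsc.".toList).length = 4 := by decide
  rw [h, pv_startswith_append, h4]

theorem pv_e2 (cs : List Char) :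
    PySem.Chars.endswith cs "_merged.mp4".toList =
      (PySem.Chars.startswith cs.reverse "4pm.".toList &&
       PySem.Chars.startswith (cs.reverse.drop 4) "degrem_".toList) := by
  rw [pv_endswith_rev]
  have h : ("_merged.mp4".toList).reverse = "4pm.".toList ++ "degrem_".toList := by decide
  have h4 : ("4pm.".toList).length = 4 := by decide
  rw [h, pv_startswith_append, h4]

theorem pv_e3 (cs : List Char) :
    PySem.Chars.endswith cs ".csv".toList = PySem.Chars.startswith cs.reverse "vsc.".toList := by
  rw [pv_endswith_rev]
  have h : (".csv".toList).reverse = "vsc.".toList := by decide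
  rw [h]

theorem pv_e4 (cs : List Char) :
    PySem.Chars.endswith cs ".mp4".toList = PySem.Chars.startswith cs.reverse "4pm.".toList := by
  rw [pv_endswith_rev]
  have h : (".mp4".toList).reverse = "4pm.".toList := by decide
  rw [h]

-- the two extension tests cannot both hold (last characters 'v' vs '4')
theorem pv_excl (cs : List Char)
    (h3 : PySem.Chars.startswith cs.reverse "vsc.".toList = true)
    (h4 : PySem.Chars.startswith cs.reverse "4pm.".toList = true) : False := by
  rw [PySem.Chars.startswith_iff] at h3 h4
  obtain ⟨t1, h1⟩ := h3
  obtain ⟨t2, h2⟩ := h4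
  rw [← h1] at h2
  simp at h2

-- B's slice of the stem: endswith s1 "_merged" as a reversed-prefix test, with s1 = (cs.reverse.drop 4).reverse
theorem pv_eM (cs : List Char) :
    PySem.Chars.endswith (cs.reverse.drop 4).reverse "_merged".toList =
      PySem.Chars.startswith (cs.reverse.drop 4) "degrem_".toList := by
  rw [pv_endswith_rev]
  have h : ("_merged".toList).reverse = "degrem_".toList := by decide
  rw [h, List.reverse_reverse]

-- ===== VERDICT (by name: the statement is the Claim_ definition above) =====
theorem normalize_video_filename_py_spec : Claim_equal_normalize_video_filename_py := by
  intro filename _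
  unfold Spec_normalize_video_filename_py normalize_video_filename_py normalize_video_filename_py_alt
  set cs := filename.toList with hcs
  have hs4 : PySem.List.slice cs none (some (-4 : Int)) = (cs.reverse.drop 4).reverse ∨
      (PySem.Chars.startswith cs.reverse "vsc.".toList = false ∧
       PySem.Chars.startswith cs.reverse "4pm.".toList = false) := by
    by_cases h3 : PySem.Chars.startswith cs.reverse "vsc.".toList = true
    · left
      have := pv_slice_of_rev_prefix cs ".csv".toList (by decide)
        (by rw [show (".csv".toList).reverse = "vsc.".toList from by decide]; exact h3)
      simpa using this
    · by_cases h4 : PySem.Chars.startswith cs.reverse "4pm.".toList = true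
      · left
        have := pv_slice_of_rev_prefix cs ".mp4".toList (by decide)
          (by rw [show (".mp4".toList).reverse = "4pm.".toList from by decide]; exact h4)
        simpa using this
      · right; exact ⟨Bool.not_eq_true _ ▸ h3, Bool.not_eq_true _ ▸ h4⟩
  by_cases h3 : PySem.Chars.startswith cs.reverse "vsc.".toList = true
  · have h4 : PySem.Chars.startswith cs.reverse "4pm.".toList = false := by
      rw [Bool.eq_false_iff]; intro h; exact pv_excl cs h3 h
    rcases hs4 with hs4 | ⟨hf, _⟩
    · by_cases hM : PySem.Chars.startswith (cs.reverse.drop 4) "degrem_".toList = true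
      · -- ends with "_merged.csv": both strip 11 chars and append ".mp4"
        have hsl : PySem.List.slice cs none (some (-((("_merged.csv".toList).length : Nat) : Int))) =
            (cs.reverse.drop 11).reverse := by
          have := pv_slice_of_rev_prefix cs "_merged.csv".toList (by decide)
            (by rw [show ("_merged.csv".toList).reverse = "vsc.".toList ++ "degrem_".toList from by decide,
                    pv_startswith_append, show ("vsc.".toList).length = 4 from by decide, h3, hM]; rfl)
          simpa using this
        have hsl7 : PySem.List.slice (cs.reverse.drop 4).reverse none (some (-7 : Int)) =
            ((cs.reverse.drop 4).drop 7).reverse := by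
          have := pv_slice_of_rev_prefix (cs.reverse.drop 4).reverse "_merged".toList (by decide)
            (by rw [show ("_merged".toList).reverse = "degrem_".toList from by decide,
                    List.reverse_reverse]; exact hM)
          simpa using this
        simp only [pvLoopA, pvPairsA, pv_e1, pv_e3, pv_e4, h3, hM, Bool.and_self,
          Bool.true_or, if_pos]
        rw [hsl, hs4]
        simp only [pv_eM, hM, if_pos, hsl7]
        simp [List.drop_drop]
      · -- ends with ".csv" but not "_merged.csv": both strip 4 chars and append ".mp4"
        rw [Bool.not_eq_true] at hM
        simp only [pvLoopA, pvPairsA, pv_e1, pv_e2, pv_e3, pv_e4, h3, h4, hM,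
          Bool.and_false, Bool.false_and, Bool.false_eq_true, not_false_eq_true,
          if_neg, Bool.true_or, if_pos]
        rw [show (-(((".csv".toList.length : Nat)) : Int)) = (-4 : Int) from by decide, hs4]
        simp only [pv_eM, hM, Bool.false_eq_true, not_false_eq_true, if_neg]
    · exact absurd h3 (by rw [hf]; decide)
  · rw [Bool.not_eq_true] at h3
    by_cases h4 : PySem.Chars.startswith cs.reverse "4pm.".toList = true
    · rcases hs4 with hs4 | ⟨_, hf⟩
      · by_cases hM : PySem.Chars.startswith (cs.reverse.drop 4) "degrem_".toList = true
        · -- ends with "_merged.mp4": both strip 11 chars and append ".mp4"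
          have hsl : PySem.List.slice cs none (some (-((("_merged.mp4".toList).length : Nat) : Int))) =
              (cs.reverse.drop 11).reverse := by
            have := pv_slice_of_rev_prefix cs "_merged.mp4".toList (by decide)
              (by rw [show ("_merged.mp4".toList).reverse = "4pm.".toList ++ "degrem_".toList from by decide,
                      pv_startswith_append, show ("4pm.".toList).length = 4 from by decide, h4, hM]; rfl)
            simpa using this
          have hsl7 : PySem.List.slice (cs.reverse.drop 4).reverse none (some (-7 : Int)) =
              ((cs.reverse.drop 4).drop 7).reverse := by
            have := pv_slice_of_rev_prefix (cs.reverse.drop 4).reverse "_merged".toList (by decide)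
              (by rw [show ("_merged".toList).reverse = "degrem_".toList from by decide,
                      List.reverse_reverse]; exact hM)
            simpa using this
          simp only [pvLoopA, pvPairsA, pv_e1, pv_e2, pv_e3, pv_e4, h3, h4, hM,
            Bool.and_self, Bool.false_and, Bool.false_eq_true, not_false_eq_true,
            if_neg, Bool.or_true, if_pos]
          rw [hsl, hs4]
          simp only [pv_eM, hM, if_pos, hsl7]
          simp [List.drop_drop]
        · -- ends with ".mp4" but not "_merged.mp4": A returns filename, B rebuilds it unchanged
          rw [Bool.not_eq_true] at hM
          obtain ⟨t, ht⟩ := (PySem.Chars.startswith_iff _ _).mp h4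
          have hback : (cs.reverse.drop 4).reverse ++ ".mp4".toList = cs := by
            rw [← ht, show (4 : Nat) = ("4pm.".toList).length from by decide, List.drop_left]
            have hcsr : cs = t.reverse ++ ".mp4".toList := by
              have := congrArg List.reverse ht
              simpa using this.symm
            rw [← hcsr]
          simp only [pvLoopA, pvPairsA, pv_e1, pv_e2, pv_e3, pv_e4, h3, h4, hM,
            Bool.and_false, Bool.false_eq_true, not_false_eq_true, if_neg,
            Bool.or_true, if_pos]
          rw [hs4]
          simp only [pv_eM, hM, Bool.false_eq_true, not_false_eq_true, if_neg]
          conv_rhs => rw [hback]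
          rw [hcs]
          exact String.ofList_toList.symm
      · exact absurd h4 (by rw [hf]; decide)
    · -- no recognised suffix: both append ".mp4"
      rw [Bool.not_eq_true] at h4
      simp only [pvLoopA, pvPairsA, pv_e1, pv_e2, pv_e3, pv_e4, h3, h4,
        Bool.false_and, Bool.false_eq_true, not_false_eq_true, if_neg,
        Bool.or_self, if_pos]
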